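-- pv_equiv track=rewrite | github.com/Revi1337/BaekJoon-Coding-Test | 백준/Gold/24391. 귀찮은 해강이/귀찮은 해강이.py | solution
-- ===== SOURCE A (Python) =====
-- def solution(N, M, rooms, codes):
--
--     def find(n):
--         """ O(1) """
--         if parents[n] == n:
--             return n
--
--         parents[n] = find(parents[n])
--         return parents[n]
--
--     def union(n1, n2):
--         """ O(1) """
--         r1, r2 = find(n1), find(n2)
--         if r2 > r1:
--             parents[r2] = r1
--         else:
--             parents[r1] = r2
--
--     parents = list(range(N + 1))
--     for room1, room2 in rooms: # O(M)
--         union(room1, room2)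
--
--     answer, prev = 0, find(codes[0])
--     for room in codes[1:]: # O(N)
--         root = find(room)
--         if root != prev:
--             answer += 1
--         prev = root
--
--     return answer
-- ===== SOURCE B (Python) =====
-- def solution(N, M, rooms, codes):
--     # Flat label-array connected components: merge by relabelling, no parent trees.
--     labels = list(range(N + 1))
--     for a, b in rooms:
--         la, lb = labels[a], labels[b]
--         if la != lb:
--             labels = [lb if x == la else x for x in labels]
--     answer = 0
--     prev = labels[codes[0]]
--     for room in codes[1:]:
--         cur = labels[room]
--         if cur != prev:
--             answer += 1
--         prev = cur
--     return answer
-- ===== Notes on version B (the rewrite author's own statement) =====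
-- stated objective: simpler
-- what changed: Replaces the recursive path-compressing union-find (parent array mutated by find/union) with a flat component-label array: each edge that joins two differently-labelled rooms relabels one class to the other, then code changes are counted by comparing labels.
import Mathlib
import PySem

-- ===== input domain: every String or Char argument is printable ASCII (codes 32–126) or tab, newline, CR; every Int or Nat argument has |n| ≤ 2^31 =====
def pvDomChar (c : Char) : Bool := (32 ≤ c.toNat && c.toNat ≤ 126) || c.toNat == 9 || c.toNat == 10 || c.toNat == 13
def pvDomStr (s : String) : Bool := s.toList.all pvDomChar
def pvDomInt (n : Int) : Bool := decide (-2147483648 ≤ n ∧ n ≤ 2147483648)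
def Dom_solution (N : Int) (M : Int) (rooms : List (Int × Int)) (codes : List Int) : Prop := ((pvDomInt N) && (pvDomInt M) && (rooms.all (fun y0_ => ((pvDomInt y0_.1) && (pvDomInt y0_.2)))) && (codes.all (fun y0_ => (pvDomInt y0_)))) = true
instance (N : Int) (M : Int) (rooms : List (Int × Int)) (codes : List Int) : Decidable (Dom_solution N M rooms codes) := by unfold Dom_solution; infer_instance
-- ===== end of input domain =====

-- B replaces A's recursive path-compressing union-find by a flat label array merged by
-- relabelling (objective: alternative/simpler decomposition; not claimed faster).

-- ===== PORT A =====
-- Python list indexing for an in-range index (negative indices wrap); out-of-range raises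
-- in Python and is excluded by Pre_ below.
def wrapIdx (n : Int) (L : Nat) : Nat := (if n < 0 then n + L else n).toNat

-- find with a fuel guard (fuel = parents.length + 1 suffices on Pre_: the parent chain strictly decreases)
def findA : Nat → List Int → Int → Int × List Int
  | 0, ps, n => (ps.getD (wrapIdx n ps.length) 0, ps)
  | fuel + 1, ps, n =>
    let p := ps.getD (wrapIdx n ps.length) 0
    if p = n then (n, ps)
    else
      let (r, ps') := findA fuel ps p
      (r, ps'.set (wrapIdx n ps'.length) r)

def unionA (ps : List Int) (n1 n2 : Int) : List Int :=
  let (r1, ps1) := findA (ps.length + 1) ps n1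
  let (r2, ps2) := findA (ps1.length + 1) ps1 n2
  if r2 > r1 then ps2.set (wrapIdx r2 ps2.length) r1 else ps2.set (wrapIdx r1 ps2.length) r2

def solution (N : Int) (M : Int) (rooms : List (Int × Int)) (codes : List Int) : Int :=
  let parents := (List.range (N + 1).toNat).map (fun k => Int.ofNat k)
  let parents := rooms.foldl (fun ps rm => unionA ps rm.1 rm.2) parents
  let fr := findA (parents.length + 1) parents (codes.getD 0 0)
  let st := (codes.drop 1).foldl
    (fun (st : Int × Int × List Int) room =>
      let fr := findA (st.2.2.length + 1) st.2.2 room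
      (if fr.1 ≠ st.2.1 then st.1 + 1 else st.1, fr.1, fr.2))
    ((0 : Int), fr.1, fr.2)
  st.1

-- ===== PORT B =====
def solution_alt (N : Int) (M : Int) (rooms : List (Int × Int)) (codes : List Int) : Int :=
  let labels := (List.range (N + 1).toNat).map (fun k => Int.ofNat k)
  let labels := rooms.foldl (fun ls rm =>
      let la := ls.getD (wrapIdx rm.1 ls.length) 0
      let lb := ls.getD (wrapIdx rm.2 ls.length) 0
      if la ≠ lb then ls.map (fun x => if x = la then lb else x) else ls) labels
  let st := (codes.drop 1).foldl
    (fun (st : Int × Int) room =>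
      let cur := labels.getD (wrapIdx room labels.length) 0
      (if cur ≠ st.2 then st.1 + 1 else st.1, cur))
    ((0 : Int), labels.getD (wrapIdx (codes.getD 0 0) labels.length) 0)
  st.1

-- ===== PRECONDITION & SPEC =====
-- Pre_ excludes exactly the inputs on which Python A raises: empty codes (IndexError on
-- codes[0]), N < 0 (parents is empty, so the unavoidable codes[0] lookup raises), and any
-- room/code index outside Python's accepted range [-(N+1), N] (IndexError).
def Pre_solution (N : Int) (M : Int) (rooms : List (Int × Int)) (codes : List Int) : Prop :=
  0 ≤ N ∧ codes ≠ [] ∧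
  (∀ rm ∈ rooms, -(N + 1) ≤ rm.1 ∧ rm.1 ≤ N ∧ -(N + 1) ≤ rm.2 ∧ rm.2 ≤ N) ∧
  (∀ c ∈ codes, -(N + 1) ≤ c ∧ c ≤ N)
instance (N : Int) (M : Int) (rooms : List (Int × Int)) (codes : List Int) : Decidable (Pre_solution N M rooms codes) := by unfold Pre_solution; infer_instance

def pvWitness_solution : Int × Int × (List (Int × Int)) × List Int :=
  (4, 2, [(1, 2), (3, 4)], [1, 2, 3, 1])

def Spec_solution (N : Int) (M : Int) (rooms : List (Int × Int)) (codes : List Int) (out : Int) : Prop := out = solution_alt N M rooms codes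
instance (N : Int) (M : Int) (rooms : List (Int × Int)) (codes : List Int) (out : Int) : Decidable (Spec_solution N M rooms codes out) := by unfold Spec_solution; infer_instance

-- ===== CLAIM (what is proved, stated in full; the proofs are below) =====
def Claim_equal_solution : Prop := ∀ (N : Int) (M : Int) (rooms : List (Int × Int)) (codes : List Int), Dom_solution N M rooms codes → Pre_solution N M rooms codes → Spec_solution N M rooms codes (solution N M rooms codes)

-- ===== LEMMAS AND PROOFS =====

-- parent pointer read as a Nat
def pGet (ps : List Int) (n : Nat) : Nat := (ps.getD n 0).toNat

-- pure root (no compression), fuel-bounded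
def proot : Nat → List Int → Nat → Nat
  | 0, _, n => n
  | f + 1, ps, n => if pGet ps n = n then n else proot f ps (pGet ps n)

def Root (ps : List Int) (n : Nat) : Nat := proot (n + 1) ps n

-- union-find invariant: entries nonnegative, each parent pointer ≤ its index
def UFInv (ps : List Int) : Prop :=
  ∀ i, i < ps.length → 0 ≤ ps.getD i 0 ∧ pGet ps i ≤ i

theorem proot_congr (ps ps' : List Int) (h : ∀ i, pGet ps i = pGet ps' i) :
    ∀ f n, proot f ps n = proot f ps' n := by
  intro f
  induction f with
  | zero => intro n; rfl
  | succ f ih => intro n; simp [proot, h, ih]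

theorem Root_congr (ps ps' : List Int) (h : ∀ i, pGet ps i = pGet ps' i) (n : Nat) :
    Root ps n = Root ps' n := proot_congr ps ps' h (n + 1) n

theorem proot_fuel (ps : List Int) (hInv : UFInv ps) :
    ∀ n, n < ps.length → ∀ f, n < f → proot f ps n = Root ps n := by
  intro n
  induction n using Nat.strong_induction_on with
  | _ n ih =>
    intro hn f hf
    match f, hf with
    | f + 1, _ =>
      by_cases hfix : pGet ps n = n
      · simp [proot, Root, hfix]
      · have hle : pGet ps n ≤ n := (hInv n hn).2
        have hlt : pGet ps n < n := lt_of_le_of_ne hle hfix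
        have hlen : pGet ps n < ps.length := lt_trans hlt hn
        simp only [proot, Root, hfix, if_false]
        rw [ih _ hlt hlen f (by omega), ih _ hlt hlen n (by omega)]

theorem Root_fix (ps : List Int) (n : Nat) (h : pGet ps n = n) : Root ps n = n := by
  simp [Root, proot, h]

theorem Root_step (ps : List Int) (hInv : UFInv ps) (n : Nat) (hn : n < ps.length)
    (h : pGet ps n ≠ n) : Root ps n = Root ps (pGet ps n) := by
  have hlt : pGet ps n < n := lt_of_le_of_ne (hInv n hn).2 h
  have hlen : pGet ps n < ps.length := lt_trans hlt hn
  simp only [Root, proot, h, if_false]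
  exact proot_fuel ps hInv _ hlen n hlt

theorem Root_le (ps : List Int) (hInv : UFInv ps) :
    ∀ n, n < ps.length → Root ps n ≤ n := by
  intro n
  induction n using Nat.strong_induction_on with
  | _ n ih =>
    intro hn
    by_cases hfix : pGet ps n = n
    · simp [Root_fix ps n hfix]
    · have hlt : pGet ps n < n := lt_of_le_of_ne (hInv n hn).2 hfix
      rw [Root_step ps hInv n hn hfix]
      exact le_trans (ih _ hlt (lt_trans hlt hn)) (le_of_lt hlt)

theorem Root_isFix (ps : List Int) (hInv : UFInv ps) :
    ∀ n, n < ps.length → pGet ps (Root ps n) = Root ps n := by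
  intro n
  induction n using Nat.strong_induction_on with
  | _ n ih =>
    intro hn
    by_cases hfix : pGet ps n = n
    · rw [Root_fix ps n hfix, hfix]
    · have hlt : pGet ps n < n := lt_of_le_of_ne (hInv n hn).2 hfix
      rw [Root_step ps hInv n hn hfix]
      exact ih _ hlt (lt_trans hlt hn)

theorem getD_set (ps : List Int) (n : Nat) (v : Int) (i : Nat) :
    (ps.set n v).getD i 0 = if i = n ∧ n < ps.length then v else ps.getD i 0 := by
  by_cases h : i = n ∧ n < ps.length
  · obtain ⟨rfl, hlt⟩ := h
    simp [List.getD, List.getElem?_set_self hlt, hlt]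
  · simp only [List.getD, if_neg h]
    rcases eq_or_ne i n with rfl | hne
    · have : ¬ i < ps.length := fun hc => h ⟨rfl, hc⟩
      rw [List.getElem?_set_self']
      simp [List.getElem?_eq_none (le_of_not_gt this)]
    · rw [List.getElem?_set_ne (fun hc => hne hc.symm)]

theorem pGet_set (ps : List Int) (n : Nat) (v : Int) (i : Nat) :
    pGet (ps.set n v) i = if i = n ∧ n < ps.length then v.toNat else pGet ps i := by
  by_cases h : i = n ∧ n < ps.length
  · obtain ⟨rfl, hlt⟩ := h
    simp [pGet, List.getD, List.getElem?_set_self hlt, hlt]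
  · simp only [pGet, List.getD, if_neg h]
    rcases eq_or_ne i n with rfl | hne
    · have : ¬ i < ps.length := fun hc => h ⟨rfl, hc⟩
      rw [List.getElem?_set_self' ]
      simp [List.getElem?_eq_none (le_of_not_gt this)]
    · rw [List.getElem?_set_ne (fun hc => hne hc.symm)]

-- setting a root r to point to a root q (q ≤ r) collapses class r into class q
theorem set_root (ps : List Int) (hInv : UFInv ps) (r q : Nat)
    (hr : r < ps.length) (hq : q < ps.length)
    (hrfix : pGet ps r = r) (hqfix : pGet ps q = q) (hle : q ≤ r) :
    UFInv (ps.set r (q : Int)) ∧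
    ∀ m, m < ps.length → Root (ps.set r (q : Int)) m = if Root ps m = r then q else Root ps m := by
  rcases Nat.eq_or_lt_of_le hle with rfl | hqr
  · -- q = r: entries unchanged pointwise
    have hpt : ∀ i, pGet ps i = pGet (ps.set q (q : Int)) i := by
      intro i
      rw [pGet_set]
      by_cases h : i = q ∧ q < ps.length
      · obtain ⟨rfl, _⟩ := h; simp [hq, hqfix]
      · simp [h]
    constructor
    · intro i hi
      rw [List.length_set] at hi
      refine ⟨?_, by rw [← hpt]; exact (hInv i hi).2⟩
      rcases eq_or_ne i q with rfl | hne
      · have : (ps.set i (i : Int)).getD i 0 = (i : Int) := by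
          simp [List.getD, List.getElem?_set_self hi]
        rw [this]; exact Int.ofNat_nonneg i
      · have : (ps.set q (q : Int)).getD i 0 = ps.getD i 0 := by
          simp [List.getD, List.getElem?_set_ne (fun hc => hne hc.symm)]
        rw [this]; exact (hInv i hi).1
    · intro m hm
      rw [← Root_congr ps _ hpt m]
      split <;> simp_all
  · -- q < r
    have hInv' : UFInv (ps.set r (q : Int)) := by
      intro i hi
      rw [List.length_set] at hi
      rw [pGet_set]
      by_cases h : i = r ∧ r < ps.length
      · obtain ⟨rfl, _⟩ := h
        constructor
        · simp [List.getD, List.getElem?_set_self hr]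
        · rw [if_pos (⟨rfl, hr⟩ : i = i ∧ i < ps.length), Int.toNat_natCast]; omega
      · constructor
        · rcases eq_or_ne i r with rfl | hne
          · exact absurd ⟨rfl, hi⟩ h
          · have : (ps.set r (q : Int)).getD i 0 = ps.getD i 0 := by
              simp [List.getD, List.getElem?_set_ne (fun hc => hne hc.symm)]
            rw [this]; exact (hInv i hi).1
        · simp only [if_neg h]; exact (hInv i hi).2
    refine ⟨hInv', ?_⟩
    intro m
    induction m using Nat.strong_induction_on with
    | _ m ih =>
      intro hm
      have hm' : m < (ps.set r (q : Int)).length := by rw [List.length_set]; exact hm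
      by_cases hmr : m = r
      · subst hmr
        have hpg : pGet (ps.set m (q : Int)) m = q := by
          rw [pGet_set]; simp [hm, Int.toNat_natCast]
        have hfix' : pGet (ps.set m (q : Int)) m ≠ m := by rw [hpg]; omega
        rw [Root_step _ hInv' m hm' hfix', hpg]
        have hq' : Root (ps.set m (q : Int)) q = (if Root ps q = m then q else Root ps q) :=
          ih q hqr hq
        rw [hq', Root_fix ps q hqfix, Root_fix ps m hrfix]
        simp [Nat.ne_of_lt hqr]
      · have hpg : pGet (ps.set r (q : Int)) m = pGet ps m := by
          rw [pGet_set]; simp [hmr]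
        by_cases hfix : pGet ps m = m
        · have h1 : Root (ps.set r (q : Int)) m = m := Root_fix _ m (by rw [hpg, hfix])
          have h2 : Root ps m = m := Root_fix ps m hfix
          rw [h1, h2, if_neg hmr]
        · have hlt : pGet ps m < m := lt_of_le_of_ne (hInv m hm).2 hfix
          have hlen : pGet ps m < ps.length := lt_trans hlt hm
          rw [Root_step _ hInv' m hm' (by rw [hpg]; exact hfix), hpg,
              ih _ hlt hlen, Root_step ps hInv m hm hfix]

-- path compression: pointing n straight at its root changes no root
theorem compress_set (ps : List Int) (hInv : UFInv ps) (n : Nat) (hn : n < ps.length) :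
    UFInv (ps.set n ((Root ps n : Nat) : Int)) ∧
    ∀ m, m < ps.length → Root (ps.set n ((Root ps n : Nat) : Int)) m = Root ps m := by
  have hrle : Root ps n ≤ n := Root_le ps hInv n hn
  have hrfix : pGet ps (Root ps n) = Root ps n := Root_isFix ps hInv n hn
  have hInv' : UFInv (ps.set n ((Root ps n : Nat) : Int)) := by
    intro i hi
    rw [List.length_set] at hi
    refine ⟨?_, ?_⟩
    · rw [getD_set]; split
      · exact Int.ofNat_nonneg _
      · exact (hInv i hi).1
    · rw [pGet_set]; split
      · next h => obtain ⟨rfl, _⟩ := h; simp only [Int.toNat_natCast]; exact hrle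
      · exact (hInv i hi).2
  refine ⟨hInv', ?_⟩
  intro m
  induction m using Nat.strong_induction_on with
  | _ m ih =>
    intro hm
    have hm' : m < (ps.set n ((Root ps n : Nat) : Int)).length := by
      rw [List.length_set]; exact hm
    by_cases hmn : m = n
    · subst hmn
      have hpg : pGet (ps.set m ((Root ps m : Nat) : Int)) m = Root ps m := by
        rw [pGet_set]; simp [hm]
      by_cases hr : Root ps m = m
      · exact (Root_fix _ m (by rw [hpg, hr])).trans hr.symm
      · have hrlt : Root ps m < m := lt_of_le_of_ne (Root_le ps hInv m hm) hr
        rw [Root_step _ hInv' m hm' (by rw [hpg]; exact hr), hpg,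
            ih _ hrlt (lt_trans hrlt hm)]
        exact Root_fix ps _ hrfix
    · have hpg : pGet (ps.set n ((Root ps n : Nat) : Int)) m = pGet ps m := by
        rw [pGet_set]; simp [hmn]
      by_cases hfx : pGet ps m = m
      · rw [Root_fix _ m (by rw [hpg, hfx]), Root_fix ps m hfx]
      · have hlt : pGet ps m < m := lt_of_le_of_ne (hInv m hm).2 hfx
        rw [Root_step _ hInv' m hm' (by rw [hpg]; exact hfx), hpg,
            ih _ hlt (lt_trans hlt hm), Root_step ps hInv m hm hfx]

-- wrapIdx facts
theorem wrapIdx_nonneg (n : Int) (L : Nat) (h : 0 ≤ n) : wrapIdx n L = n.toNat := by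
  unfold wrapIdx
  rw [if_neg (not_lt.mpr h)]

theorem wrapIdx_lt (n : Int) (L : Nat) (h1 : -(L : Int) ≤ n) (h2 : n < (L : Int)) :
    wrapIdx n L < L := by
  unfold wrapIdx
  split <;> omega

theorem wrapIdx_natCast (k : Nat) (L : Nat) : wrapIdx ((k : Nat) : Int) L = k := by
  rw [wrapIdx_nonneg _ _ (Int.natCast_nonneg k), Int.toNat_natCast]

-- find on a nonnegative index: returns the root, preserves UFInv, length and all roots
theorem findA_spec : ∀ (fuel : Nat) (ps : List Int) (n : Int), UFInv ps → 0 ≤ n →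
    n.toNat < ps.length → n.toNat < fuel →
    (findA fuel ps n).1 = ((Root ps n.toNat : Nat) : Int) ∧
    (findA fuel ps n).2.length = ps.length ∧
    UFInv (findA fuel ps n).2 ∧
    ∀ m, m < ps.length → Root (findA fuel ps n).2 m = Root ps m := by
  intro fuel
  induction fuel with
  | zero => intro ps n _ _ _ h; omega
  | succ fuel ih =>
    intro ps n hInv hn hlen hfuel
    have hw : wrapIdx n ps.length = n.toNat := wrapIdx_nonneg n ps.length hn
    by_cases hfix : ps.getD (wrapIdx n ps.length) 0 = n
    · have hfix' : ps.getD n.toNat 0 = n := by rw [← hw]; exact hfix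
      have hfixN : pGet ps n.toNat = n.toNat := by
        simp only [pGet, hfix', Int.toNat_of_nonneg hn]
      have heq : findA (fuel + 1) ps n = (n, ps) := by
        simp only [findA]; rw [if_pos hfix]
      rw [heq]
      exact ⟨by rw [Root_fix ps n.toNat hfixN, Int.toNat_of_nonneg hn], rfl, hInv, fun m _ => rfl⟩
    · have hfix' : ¬ ps.getD n.toNat 0 = n := by rw [← hw]; exact hfix
      have hp0 : 0 ≤ ps.getD n.toNat 0 := (hInv n.toNat hlen).1
      have hple : pGet ps n.toNat ≤ n.toNat := (hInv n.toNat hlen).2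
      have hpne : pGet ps n.toNat ≠ n.toNat := by
        intro hc
        apply hfix'
        have h' : ((ps.getD n.toNat 0).toNat : Int) = ps.getD n.toNat 0 := Int.toNat_of_nonneg hp0
        simp only [pGet] at hc
        rw [← h', hc, Int.toNat_of_nonneg hn]
      have hplt : pGet ps n.toNat < n.toNat := lt_of_le_of_ne hple hpne
      have hplen : pGet ps n.toNat < ps.length := lt_trans hplt hlen
      have hroot : Root ps (pGet ps n.toNat) = Root ps n.toNat :=
        (Root_step ps hInv n.toNat hlen hpne).symm
      simp only [pGet] at hplt hplen hroot
      obtain ⟨h1, h2, h3, h4⟩ := ih ps (ps.getD n.toNat 0) hInv hp0 hplen (by omega)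
      set res := findA fuel ps (ps.getD n.toNat 0) with hres
      have hr1 : res.1 = ((Root ps n.toNat : Nat) : Int) := by rw [h1, hroot]
      have hRn : Root res.2 n.toNat = Root ps n.toNat := h4 n.toNat hlen
      have hval : res.1 = ((Root res.2 n.toNat : Nat) : Int) := by rw [hr1, hRn]
      have hcomp := compress_set res.2 h3 n.toNat (by rw [h2]; exact hlen)
      have heq : findA (fuel + 1) ps n = (res.1, res.2.set n.toNat res.1) := by
        simp only [findA]
        rw [if_neg hfix, hw, ← hres, show wrapIdx n res.2.length = n.toNat from
          wrapIdx_nonneg n res.2.length hn]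
      rw [heq]
      refine ⟨hr1, ?_, ?_, ?_⟩
      · simp [List.length_set, h2]
      · rw [hval]; exact hcomp.1
      · intro m hm
        rw [hval, hcomp.2 m (by rw [h2]; exact hm), h4 m hm]

-- find on any in-range index (fuel = length + 1): wraps a possibly negative index
theorem findA_wspec (ps : List Int) (n : Int) (hInv : UFInv ps)
    (hlo : -(ps.length : Int) ≤ n) (hhi : n < (ps.length : Int)) :
    (findA (ps.length + 1) ps n).1 = ((Root ps (wrapIdx n ps.length) : Nat) : Int) ∧
    (findA (ps.length + 1) ps n).2.length = ps.length ∧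
    UFInv (findA (ps.length + 1) ps n).2 ∧
    ∀ m, m < ps.length → Root (findA (ps.length + 1) ps n).2 m = Root ps m := by
  by_cases hn : 0 ≤ n
  · have hw : wrapIdx n ps.length = n.toNat := wrapIdx_nonneg n ps.length hn
    rw [hw]
    exact findA_spec (ps.length + 1) ps n hInv hn (by omega) (by omega)
  · push_neg at hn
    have hwlt : wrapIdx n ps.length < ps.length := wrapIdx_lt n ps.length hlo hhi
    set w := wrapIdx n ps.length with hwdef
    have hp0 : 0 ≤ ps.getD w 0 := (hInv w hwlt).1
    have hple : pGet ps w ≤ w := (hInv w hwlt).2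
    have hpfix : ¬ ps.getD w 0 = n := by
      intro hc
      rw [hc] at hp0
      omega
    have hplen : (ps.getD w 0).toNat < ps.length := by
      simp only [pGet] at hple
      omega
    obtain ⟨h1', h2', h3', h4'⟩ := findA_spec ps.length ps (ps.getD w 0) hInv hp0 hplen hplen
    set res := findA ps.length ps (ps.getD w 0) with hres
    have hroot : Root ps ((ps.getD w 0).toNat) = Root ps w := by
      by_cases hfx : pGet ps w = w
      · simp only [pGet] at hfx
        rw [hfx]
      · have hstep := Root_step ps hInv w hwlt hfx
        simp only [pGet] at hstep
        exact hstep.symm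
    have hval : res.1 = ((Root ps w : Nat) : Int) := by rw [h1', hroot]
    have hRw : Root res.2 w = Root ps w := h4' w hwlt
    have hval2 : res.1 = ((Root res.2 w : Nat) : Int) := by rw [hval, hRw]
    have hcomp := compress_set res.2 h3' w (by rw [h2']; exact hwlt)
    have heq : findA (ps.length + 1) ps n = (res.1, res.2.set w res.1) := by
      simp only [findA]
      rw [if_neg (by rw [← hwdef]; exact hpfix)]
      rw [← hwdef, ← hres, h2', ← hwdef]
    rw [heq]
    refine ⟨hval, ?_, ?_, ?_⟩
    · simp [List.length_set, h2']
    · rw [hval2]; exact hcomp.1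
    · intro m hm
      rw [hval2, hcomp.2 m (by rw [h2']; exact hm), h4' m hm]

-- union: preserves UFInv and length; merges exactly the classes of n1 and n2
theorem unionA_spec (ps : List Int) (n1 n2 : Int) (hInv : UFInv ps)
    (h1 : -(ps.length : Int) ≤ n1) (h1l : n1 < (ps.length : Int))
    (h2 : -(ps.length : Int) ≤ n2) (h2l : n2 < (ps.length : Int)) :
    UFInv (unionA ps n1 n2) ∧ (unionA ps n1 n2).length = ps.length ∧
    ∀ x y, x < ps.length → y < ps.length →
      (Root (unionA ps n1 n2) x = Root (unionA ps n1 n2) y ↔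
        (Root ps x = Root ps y ∨
         (Root ps x = Root ps (wrapIdx n1 ps.length) ∧ Root ps y = Root ps (wrapIdx n2 ps.length)) ∨
         (Root ps x = Root ps (wrapIdx n2 ps.length) ∧ Root ps y = Root ps (wrapIdx n1 ps.length)))) := by
  obtain ⟨f1a, f1b, f1c, f1d⟩ := findA_wspec ps n1 hInv h1 h1l
  set ps1 := (findA (ps.length + 1) ps n1).2 with hps1
  obtain ⟨f2a, f2b, f2c, f2d⟩ := findA_wspec ps1 n2 f1c (by rw [f1b]; exact h2) (by rw [f1b]; exact h2l)
  set ps2 := (findA (ps1.length + 1) ps1 n2).2 with hps2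
  have hlen2 : ps2.length = ps.length := by rw [f2b, f1b]
  set r1 := Root ps (wrapIdx n1 ps.length) with hr1
  set r2 := Root ps (wrapIdx n2 ps.length) with hr2
  have hw1 : wrapIdx n1 ps.length < ps.length := wrapIdx_lt n1 ps.length h1 h1l
  have hw2 : wrapIdx n2 ps.length < ps.length := wrapIdx_lt n2 ps.length h2 h2l
  have hv1 : (findA (ps.length + 1) ps n1).1 = ((r1 : Nat) : Int) := f1a
  have hv2 : (findA (ps1.length + 1) ps1 n2).1 = ((r2 : Nat) : Int) := by
    rw [f2a, show wrapIdx n2 ps1.length = wrapIdx n2 ps.length from by rw [f1b],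
        f1d (wrapIdx n2 ps.length) hw2]
  have hr1l : r1 < ps.length := lt_of_le_of_lt (Root_le ps hInv _ hw1) hw1
  have hr2l : r2 < ps.length := lt_of_le_of_lt (Root_le ps hInv _ hw2) hw2
  have hRoots2 : ∀ m, m < ps.length → Root ps2 m = Root ps m := by
    intro m hm
    rw [f2d m (by rw [f1b]; exact hm), f1d m hm]
  have hfix1 : pGet ps2 r1 = r1 := by
    have := Root_isFix ps2 f2c (wrapIdx n1 ps.length) (by rw [hlen2]; exact hw1)
    rwa [hRoots2 (wrapIdx n1 ps.length) hw1, ← hr1] at this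
  have hfix2 : pGet ps2 r2 = r2 := by
    have := Root_isFix ps2 f2c (wrapIdx n2 ps.length) (by rw [hlen2]; exact hw2)
    rwa [hRoots2 (wrapIdx n2 ps.length) hw2, ← hr2] at this
  have huni : unionA ps n1 n2 =
      if ((r1 : Nat) : Int) < ((r2 : Nat) : Int) then
        ps2.set (wrapIdx ((r2 : Nat) : Int) ps2.length) ((r1 : Nat) : Int)
      else ps2.set (wrapIdx ((r1 : Nat) : Int) ps2.length) ((r2 : Nat) : Int) := by
    simp only [unionA]
    rw [← hps1, ← hps2, hv1, hv2]
  rcases lt_or_ge r1 r2 with hlt | hge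
  · have hset := set_root ps2 f2c r2 r1 (by rw [hlen2]; exact hr2l) (by rw [hlen2]; exact hr1l)
      hfix2 hfix1 (le_of_lt hlt)
    have hif : unionA ps n1 n2 = ps2.set r2 ((r1 : Nat) : Int) := by
      rw [huni, if_pos (by exact_mod_cast hlt), wrapIdx_natCast]
    rw [hif]
    refine ⟨hset.1, by rw [List.length_set, hlen2], ?_⟩
    intro x y hx hy
    rw [hset.2 x (by rw [hlen2]; exact hx), hset.2 y (by rw [hlen2]; exact hy)]
    simp only [hRoots2 x hx, hRoots2 y hy]
    split_ifs <;> omega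
  · have hset := set_root ps2 f2c r1 r2 (by rw [hlen2]; exact hr1l) (by rw [hlen2]; exact hr2l)
      hfix1 hfix2 hge
    have hif : unionA ps n1 n2 = ps2.set r1 ((r2 : Nat) : Int) := by
      rw [huni, if_neg (by exact_mod_cast not_lt.mpr hge), wrapIdx_natCast]
    rw [hif]
    refine ⟨hset.1, by rw [List.length_set, hlen2], ?_⟩
    intro x y hx hy
    rw [hset.2 x (by rw [hlen2]; exact hx), hset.2 y (by rw [hlen2]; exact hy)]
    simp only [hRoots2 x hx, hRoots2 y hy]
    split_ifs <;> omega

theorem range_map_getD (n i : Nat) (hi : i < n) :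
    ((List.range n).map (fun k => Int.ofNat k)).getD i 0 = (i : Int) := by
  have h1 : ((List.range n).map (fun k => Int.ofNat k))[i]? = some (Int.ofNat i) := by
    rw [List.getElem?_map, List.getElem?_range hi]
    rfl
  simp only [List.getD, h1, Option.getD_some]
  rfl

theorem init_inv (n : Nat) : UFInv ((List.range n).map (fun k => Int.ofNat k)) := by
  intro i hi
  simp only [List.length_map, List.length_range] at hi
  have h := range_map_getD n i hi
  refine ⟨by rw [h]; exact Int.natCast_nonneg i, ?_⟩
  simp only [pGet]
  rw [h, Int.toNat_natCast]

theorem init_root (n : Nat) (i : Nat) (hi : i < n) :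
    Root ((List.range n).map (fun k => Int.ofNat k)) i = i :=
  Root_fix _ i (by simp only [pGet]; rw [range_map_getD n i hi, Int.toNat_natCast])

def stepA (ps : List Int) (rm : Int × Int) : List Int := unionA ps rm.1 rm.2

def stepB (ls : List Int) (rm : Int × Int) : List Int :=
  let la := ls.getD (wrapIdx rm.1 ls.length) 0
  let lb := ls.getD (wrapIdx rm.2 ls.length) 0
  if la ≠ lb then ls.map (fun x => if x = la then lb else x) else ls

theorem getD_map_if (ls : List Int) (la lb : Int) (x : Nat) (hx : x < ls.length) :
    ((ls.map (fun v => if v = la then lb else v)).getD x 0)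
      = (if ls.getD x 0 = la then lb else ls.getD x 0) := by
  simp [List.getD, List.getElem?_map, List.getElem?_eq_getElem hx]

-- the two edge-folds kept in lockstep: label equality is root equality
theorem parallel_fold (L : Nat) :
    ∀ (rooms : List (Int × Int)) (ps ls : List Int), UFInv ps → ps.length = L → ls.length = L →
    (∀ rm ∈ rooms, -(L : Int) ≤ rm.1 ∧ rm.1 < (L : Int) ∧ -(L : Int) ≤ rm.2 ∧ rm.2 < (L : Int)) →
    (∀ x y, x < L → y < L → (ls.getD x 0 = ls.getD y 0 ↔ Root ps x = Root ps y)) →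
    UFInv (rooms.foldl stepA ps) ∧ (rooms.foldl stepA ps).length = L ∧
    (rooms.foldl stepB ls).length = L ∧
    (∀ x y, x < L → y < L →
      ((rooms.foldl stepB ls).getD x 0 = (rooms.foldl stepB ls).getD y 0 ↔
       Root (rooms.foldl stepA ps) x = Root (rooms.foldl stepA ps) y)) := by
  intro rooms
  induction rooms with
  | nil =>
    intro ps ls hInv hpl hll _ hiff
    exact ⟨hInv, hpl, hll, hiff⟩
  | cons rm rest ih =>
    intro ps ls hInv hpl hll hvalid hiff
    obtain ⟨ha0, hal, hb0, hbl⟩ := hvalid rm (List.mem_cons_self)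
    have hwa : wrapIdx rm.1 L < L := wrapIdx_lt rm.1 L ha0 hal
    have hwb : wrapIdx rm.2 L < L := wrapIdx_lt rm.2 L hb0 hbl
    obtain ⟨u1, u2, u3⟩ := unionA_spec ps rm.1 rm.2 hInv
      (by rw [hpl]; exact ha0) (by rw [hpl]; exact hal)
      (by rw [hpl]; exact hb0) (by rw [hpl]; exact hbl)
    rw [hpl] at u3
    have hu2 : (unionA ps rm.1 rm.2).length = L := by rw [u2, hpl]
    rw [List.foldl_cons, List.foldl_cons]
    have hsA : stepA ps rm = unionA ps rm.1 rm.2 := rfl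
    rw [hsA]
    by_cases hlab : ls.getD (wrapIdx rm.1 L) 0 = ls.getD (wrapIdx rm.2 L) 0
    · -- labels already equal: list unchanged; roots of a and b already equal
      have hsB : stepB ls rm = ls := by
        unfold stepB
        rw [hll, if_neg (not_not_intro hlab)]
      rw [hsB]
      have hrab : Root ps (wrapIdx rm.1 L) = Root ps (wrapIdx rm.2 L) :=
        (hiff _ _ hwa hwb).mp hlab
      have hiff' : ∀ x y, x < L → y < L →
          (ls.getD x 0 = ls.getD y 0 ↔
            Root (unionA ps rm.1 rm.2) x = Root (unionA ps rm.1 rm.2) y) := by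
        intro x y hx hy
        rw [u3 x y hx hy, hiff x y hx hy]
        constructor
        · intro h; exact Or.inl h
        · rintro (h | ⟨h1, h2⟩ | ⟨h1, h2⟩) <;> omega
      exact ih (unionA ps rm.1 rm.2) ls u1 hu2 hll
        (fun r hr => hvalid r (List.mem_cons_of_mem rm hr)) hiff'
    · -- relabel the class of la to lb
      set la := ls.getD (wrapIdx rm.1 L) 0 with hla
      set lb := ls.getD (wrapIdx rm.2 L) 0 with hlb
      have hsB : stepB ls rm = ls.map (fun v => if v = la then lb else v) := by
        unfold stepB
        rw [hll, ← hla, ← hlb, if_pos hlab]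
      rw [hsB]
      have hll' : (ls.map (fun v => if v = la then lb else v)).length = L := by
        rw [List.length_map]; exact hll
      have hiff' : ∀ x y, x < L → y < L →
          ((ls.map (fun v => if v = la then lb else v)).getD x 0 =
           (ls.map (fun v => if v = la then lb else v)).getD y 0 ↔
            Root (unionA ps rm.1 rm.2) x = Root (unionA ps rm.1 rm.2) y) := by
        intro x y hx hy
        rw [getD_map_if ls la lb x (by rw [hll]; exact hx),
            getD_map_if ls la lb y (by rw [hll]; exact hy),
            u3 x y hx hy]
        have e1 : ls.getD x 0 = ls.getD y 0 ↔ Root ps x = Root ps y := hiff x y hx hy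
        have e2 : ls.getD x 0 = la ↔ Root ps x = Root ps (wrapIdx rm.1 L) := hiff x _ hx hwa
        have e3 : ls.getD y 0 = la ↔ Root ps y = Root ps (wrapIdx rm.1 L) := hiff y _ hy hwa
        have e4 : ls.getD x 0 = lb ↔ Root ps x = Root ps (wrapIdx rm.2 L) := hiff x _ hx hwb
        have e5 : ls.getD y 0 = lb ↔ Root ps y = Root ps (wrapIdx rm.2 L) := hiff y _ hy hwb
        by_cases c1 : ls.getD x 0 = la <;> by_cases c2 : ls.getD y 0 = la
        · rw [if_pos c1, if_pos c2]
          have t1 := e2.mp c1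
          have t2 := e3.mp c2
          constructor
          · intro _; exact Or.inl (t1.trans t2.symm)
          · intro _; rfl
        · rw [if_pos c1, if_neg c2]
          constructor
          · intro h; exact Or.inr (Or.inl ⟨e2.mp c1, e5.mp h.symm⟩)
          · rintro (h | ⟨hx1, hy2⟩ | ⟨hx2, hy1⟩)
            · exact absurd ((e1.mpr h) ▸ c1) c2
            · exact (e5.mpr hy2).symm
            · exact absurd (e3.mpr hy1) c2
        · rw [if_neg c1, if_pos c2]
          constructor
          · intro h; exact Or.inr (Or.inr ⟨e4.mp h, e3.mp c2⟩)
          · rintro (h | ⟨hx1, hy2⟩ | ⟨hx2, hy1⟩)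
            · exact absurd ((e1.mpr h).symm ▸ c2) c1
            · exact absurd (e2.mpr hx1) c1
            · exact e4.mpr hx2
        · rw [if_neg c1, if_neg c2]
          rw [e1]
          constructor
          · intro h; exact Or.inl h
          · rintro (h | ⟨hx1, hy2⟩ | ⟨hx2, hy1⟩)
            · exact h
            · exact absurd (e2.mpr hx1) c1
            · exact absurd (e3.mpr hy1) c2
      exact ih (unionA ps rm.1 rm.2) (ls.map (fun v => if v = la then lb else v)) u1 hu2 hll'
        (fun r hr => hvalid r (List.mem_cons_of_mem rm hr)) hiff'

-- pure change count
def changes (f : Int → Int) : Int → List Int → Int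
  | _, [] => 0
  | prev, c :: tl => (if f c ≠ prev then 1 else 0) + changes f (f c) tl

theorem loopA_changes (L : Nat) (P : List Int) :
    ∀ (rest : List Int) (ans prev : Int) (ps : List Int), UFInv ps → ps.length = L →
    (∀ m, m < L → Root ps m = Root P m) →
    (∀ c ∈ rest, -(L : Int) ≤ c ∧ c < (L : Int)) →
    (rest.foldl (fun (st : Int × Int × List Int) room =>
        let fr := findA (st.2.2.length + 1) st.2.2 room
        (if fr.1 ≠ st.2.1 then st.1 + 1 else st.1, fr.1, fr.2)) (ans, prev, ps)).1
      = ans + changes (fun c => ((Root P (wrapIdx c L) : Nat) : Int)) prev rest := by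
  intro rest
  induction rest with
  | nil => intro ans prev ps _ _ _ _; simp [changes]
  | cons c tl ih =>
    intro ans prev ps hInv hpl hroots hvalid
    obtain ⟨hc0, hcl⟩ := hvalid c (List.mem_cons_self)
    have hwc : wrapIdx c L < L := wrapIdx_lt c L hc0 hcl
    obtain ⟨f1, f2, f3, f4⟩ := findA_wspec ps c hInv (by rw [hpl]; exact hc0) (by rw [hpl]; exact hcl)
    have hval : (findA (ps.length + 1) ps c).1 = ((Root P (wrapIdx c L) : Nat) : Int) := by
      rw [f1, show wrapIdx c ps.length = wrapIdx c L from by rw [hpl],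
          hroots (wrapIdx c L) hwc]
    have hroots' : ∀ m, m < L → Root (findA (ps.length + 1) ps c).2 m = Root P m := by
      intro m hm
      rw [f4 m (by rw [hpl]; exact hm), hroots m hm]
    simp only [List.foldl_cons]
    rw [ih _ _ _ f3 (by rw [f2, hpl]) hroots' (fun d hd => hvalid d (List.mem_cons_of_mem c hd))]
    simp only [changes, hval]
    split_ifs <;> omega

theorem loopB_changes (ls : List Int) :
    ∀ (rest : List Int) (ans prev : Int),
    (rest.foldl (fun (st : Int × Int) room =>
        let cur := ls.getD (wrapIdx room ls.length) 0
        (if cur ≠ st.2 then st.1 + 1 else st.1, cur)) (ans, prev)).1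
      = ans + changes (fun c => ls.getD (wrapIdx c ls.length) 0) prev rest := by
  intro rest
  induction rest with
  | nil => intro ans prev; simp [changes]
  | cons c tl ih =>
    intro ans prev
    simp only [List.foldl_cons]
    rw [ih]
    simp only [changes]
    split_ifs <;> omega

theorem changes_congr (f g : Int → Int) (S : List Int)
    (h : ∀ c ∈ S, ∀ c' ∈ S, (f c = f c' ↔ g c = g c')) :
    ∀ (rest : List Int) (c0 : Int), (∀ c ∈ rest, c ∈ S) → c0 ∈ S →
    changes f (f c0) rest = changes g (g c0) rest := by
  intro rest
  induction rest with
  | nil => intro c0 _ _; rfl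
  | cons c tl ih =>
    intro c0 hsub hc0
    have hcS : c ∈ S := hsub c (List.mem_cons_self)
    have hiff := h c hcS c0 hc0
    simp only [changes]
    rw [ih c (fun d hd => hsub d (List.mem_cons_of_mem c hd)) hcS]
    have : (if f c ≠ f c0 then (1 : Int) else 0) = (if g c ≠ g c0 then (1 : Int) else 0) := by
      split_ifs <;> tauto
    rw [this]

-- ===== VERDICT (by name: the statement is the Claim_ definition above) =====
theorem solution_spec : Claim_equal_solution := by
  intro N M rooms codes _ hpre
  obtain ⟨hN, hcodes, hrooms, hc⟩ := hpre
  unfold Spec_solution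
  set L := (N + 1).toNat with hL
  have hLI : (L : Int) = N + 1 := by omega
  obtain ⟨c0, rest, rfl⟩ : ∃ c0 rest, codes = c0 :: rest := by
    cases codes with
    | nil => exact absurd rfl hcodes
    | cons a l => exact ⟨a, l, rfl⟩
  set init := (List.range L).map (fun k => Int.ofNat k) with hinit
  have hinitlen : init.length = L := by rw [hinit, List.length_map, List.length_range]
  have hinv0 : UFInv init := init_inv L
  have hbase : ∀ x y, x < L → y < L →
      (init.getD x 0 = init.getD y 0 ↔ Root init x = Root init y) := by
    intro x y hx hy
    rw [hinit, range_map_getD L x hx, range_map_getD L y hy, init_root L x hx, init_root L y hy]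
    exact Int.natCast_inj
  have hvalid : ∀ rm ∈ rooms, -(L : Int) ≤ rm.1 ∧ rm.1 < (L : Int) ∧
      -(L : Int) ≤ rm.2 ∧ rm.2 < (L : Int) := by
    intro rm hrm
    obtain ⟨h1, h2, h3, h4⟩ := hrooms rm hrm
    omega
  obtain ⟨hPinv, hPlen, hLSlen, hPiff⟩ :=
    parallel_fold L rooms init init hinv0 hinitlen hinitlen hvalid hbase
  set P := rooms.foldl stepA init with hP
  set LS := rooms.foldl stepB init with hLS
  have hc0 := hc c0 List.mem_cons_self
  have hc0lo : -(L : Int) ≤ c0 := by omega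
  have hc0hi : c0 < (L : Int) := by omega
  have hwc0 : wrapIdx c0 L < L := wrapIdx_lt c0 L hc0lo hc0hi
  obtain ⟨g1, g2, g3, g4⟩ := findA_wspec P c0 hPinv
    (by rw [hPlen]; exact hc0lo) (by rw [hPlen]; exact hc0hi)
  have g1' : (findA (P.length + 1) P c0).1 = ((Root P (wrapIdx c0 L) : Nat) : Int) := by
    rw [g1, show wrapIdx c0 P.length = wrapIdx c0 L from by rw [hPlen]]
  have hA : solution N M rooms (c0 :: rest) =
      ((rest.foldl (fun (st : Int × Int × List Int) room =>
        let fr := findA (st.2.2.length + 1) st.2.2 room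
        (if fr.1 ≠ st.2.1 then st.1 + 1 else st.1, fr.1, fr.2))
        ((0 : Int), (findA (P.length + 1) P c0).1, (findA (P.length + 1) P c0).2))).1 := by
    rfl
  have hB : solution_alt N M rooms (c0 :: rest) =
      ((rest.foldl (fun (st : Int × Int) room =>
        let cur := LS.getD (wrapIdx room LS.length) 0
        (if cur ≠ st.2 then st.1 + 1 else st.1, cur))
        ((0 : Int), LS.getD (wrapIdx c0 LS.length) 0))).1 := by
    rfl
  have hroots2 : ∀ m, m < L → Root (findA (P.length + 1) P c0).2 m = Root P m := by
    intro m hm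
    exact g4 m (by rw [hPlen]; exact hm)
  have hrestvalid : ∀ c ∈ rest, -(L : Int) ≤ c ∧ c < (L : Int) := by
    intro c hcr
    have := hc c (List.mem_cons_of_mem c0 hcr)
    omega
  have hAval : solution N M rooms (c0 :: rest) =
      changes (fun c => ((Root P (wrapIdx c L) : Nat) : Int)) ((Root P (wrapIdx c0 L) : Nat) : Int) rest := by
    rw [hA, loopA_changes L P rest 0 (findA (P.length + 1) P c0).1 (findA (P.length + 1) P c0).2
      g3 (by rw [g2, hPlen]) hroots2 hrestvalid, g1']
    omega
  have hBval : solution_alt N M rooms (c0 :: rest) =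
      changes (fun c => LS.getD (wrapIdx c LS.length) 0) (LS.getD (wrapIdx c0 LS.length) 0) rest := by
    rw [hB, loopB_changes LS rest 0 (LS.getD (wrapIdx c0 LS.length) 0)]
    omega
  have hcfg : ∀ c ∈ (c0 :: rest), ∀ c' ∈ (c0 :: rest),
      (((Root P (wrapIdx c L) : Nat) : Int) = ((Root P (wrapIdx c' L) : Nat) : Int) ↔
        LS.getD (wrapIdx c LS.length) 0 = LS.getD (wrapIdx c' LS.length) 0) := by
    intro c hcm c' hcm'
    have h1 := hc c hcm
    have h2 := hc c' hcm'
    have hwl : wrapIdx c L < L := wrapIdx_lt c L (by omega) (by omega)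
    have hwl' : wrapIdx c' L < L := wrapIdx_lt c' L (by omega) (by omega)
    rw [show wrapIdx c LS.length = wrapIdx c L from by rw [hLSlen],
        show wrapIdx c' LS.length = wrapIdx c' L from by rw [hLSlen],
        Int.natCast_inj, ← hPiff (wrapIdx c L) (wrapIdx c' L) hwl hwl']
  rw [hAval, hBval]
  exact changes_congr (fun c => ((Root P (wrapIdx c L) : Nat) : Int))
    (fun c => LS.getD (wrapIdx c LS.length) 0)
    (c0 :: rest) hcfg rest c0 (fun c hcr => List.mem_cons_of_mem c0 hcr) List.mem_cons_self
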